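-- pv_equiv track=rewrite | github.com/raylutz/daffodil | tests/daf_benchmarks.py | hllol_sum_cols
-- ===== SOURCE A (Python) =====
-- from typing import List, Dict, Optional, Any, Tuple
--
-- def hllol_sum_cols(hllol: Tuple[List[str], List[List[Any]]], cols: Optional[List[str]] = None) -> Dict[str, int]:
--
--     (header_ls, lol) = hllol
--
--     if cols is None:
--         cols_ls = header_ls
--     else:
--         cols_ls = cols
--
--     result_di = {}
--
--     for coli, col in enumerate(header_ls):
--         if col not in cols_ls:
--             continue
--         sum_coli = 0
--         for row in lol:
--             sum_coli += row[coli]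
--
--         result_di[col] = sum_coli
--
--     return result_di
-- ===== SOURCE B (Python) =====
-- def hllol_sum_cols(hllol, cols=None):
--     (header_ls, lol) = hllol
--     wanted = set(header_ls if cols is None else cols)
--     sel = [i for i, col in enumerate(header_ls) if col in wanted]
--     sums = [0] * len(sel)
--     for row in lol:
--         sums = [s + row[i] for s, i in zip(sums, sel)]
--     return {header_ls[i]: s for i, s in zip(sel, sums)}
-- ===== Notes on version B (the rewrite author's own statement) =====
-- stated objective: alternative
-- what changed: A scans the whole table once per selected header column (column-major, with a list membership test per column); B computes the selected column indices once via a set, then makes a single row-major pass maintaining one running sum per selected index, and finally builds the dict from the (index, sum) pairs.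
import Mathlib
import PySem

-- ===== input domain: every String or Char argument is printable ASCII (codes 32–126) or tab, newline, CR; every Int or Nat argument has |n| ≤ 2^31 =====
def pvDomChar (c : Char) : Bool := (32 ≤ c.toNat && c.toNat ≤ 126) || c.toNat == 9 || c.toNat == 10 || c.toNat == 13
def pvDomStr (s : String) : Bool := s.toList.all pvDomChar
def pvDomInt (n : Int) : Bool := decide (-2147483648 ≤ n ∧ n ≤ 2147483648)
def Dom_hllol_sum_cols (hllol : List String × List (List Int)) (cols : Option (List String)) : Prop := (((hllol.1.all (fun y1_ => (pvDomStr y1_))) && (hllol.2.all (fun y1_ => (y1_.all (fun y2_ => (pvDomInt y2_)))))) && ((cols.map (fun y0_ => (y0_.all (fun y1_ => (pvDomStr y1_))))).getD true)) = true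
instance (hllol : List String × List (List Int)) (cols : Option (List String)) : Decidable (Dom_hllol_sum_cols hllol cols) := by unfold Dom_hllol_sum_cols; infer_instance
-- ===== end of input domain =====

-- B replaces A's column-major per-column rescans of the table by a single row-major pass
-- over precomputed selected indices (set membership computed once); same results (alternative decomposition).

-- ===== PORT A =====
def hllol_sum_cols (hllol : List String × List (List Int)) (cols : Option (List String)) : List (String × Int) :=
  let header_ls := hllol.1
  let lol := hllol.2
  let cols_ls := cols.getD header_ls
  -- for coli, col in enumerate(header_ls): if col in cols_ls: result_di[col] = sum over rows of row[coli]
  -- row[coli] is pyGetD (total form); Pre_ excludes the IndexError inputs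
  let result_di : PySem.Dict String Int :=
    (PySem.List.enumerate header_ls).foldl
      (fun d ic =>
        if ic.2 ∈ cols_ls then
          d.insert ic.2 (lol.foldl (fun s row => s + PySem.List.pyGetD row ic.1 0) 0)
        else d)
      PySem.Dict.empty
  result_di.items

-- ===== PORT B =====
def hllol_sum_cols_alt (hllol : List String × List (List Int)) (cols : Option (List String)) : List (String × Int) :=
  let header_ls := hllol.1
  let lol := hllol.2
  let wanted : PySem.Set String := PySem.Set.ofList (cols.getD header_ls)
  let sel : List Int :=
    (PySem.List.enumerate header_ls).filterMap
      (fun ic => if ic.2 ∈ wanted then some ic.1 else none)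
  let sums0 : List Int := sel.map (fun _ => 0)      -- [0] * len(sel)
  let sums : List Int :=
    lol.foldl (fun sums row => (sums.zip sel).map (fun p => p.1 + PySem.List.pyGetD row p.2 0)) sums0
  ((sel.zip sums).foldl
      (fun (d : PySem.Dict String Int) p =>
        d.insert (PySem.List.pyGetD header_ls p.1 "") p.2)
      PySem.Dict.empty).items

-- ===== PRECONDITION & SPEC =====
-- Pre_ excludes exactly the inputs where Python A raises IndexError: a selected column
-- index out of range for some row.
def Pre_hllol_sum_cols (hllol : List String × List (List Int)) (cols : Option (List String)) : Prop :=
  ∀ ic ∈ PySem.List.enumerate hllol.1, ic.2 ∈ (cols.getD hllol.1) →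
    ∀ row ∈ hllol.2, PySem.Raise.InRange row.length ic.1
instance (hllol : List String × List (List Int)) (cols : Option (List String)) : Decidable (Pre_hllol_sum_cols hllol cols) := by unfold Pre_hllol_sum_cols; infer_instance

def pvWitness_hllol_sum_cols : (List String × List (List Int)) × Option (List String) :=
  ((["a", "b"], [[1, 2], [3, 4]]), some ["b"])

def Spec_hllol_sum_cols (hllol : List String × List (List Int)) (cols : Option (List String)) (out : List (String × Int)) : Prop := out = hllol_sum_cols_alt hllol cols
instance (hllol : List String × List (List Int)) (cols : Option (List String)) (out : List (String × Int)) : Decidable (Spec_hllol_sum_cols hllol cols out) := by unfold Spec_hllol_sum_cols; infer_instance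

-- ===== CLAIM (what is proved, stated in full; the proofs are below) =====
def Claim_equal_hllol_sum_cols : Prop := ∀ (hllol : List String × List (List Int)) (cols : Option (List String)), Dom_hllol_sum_cols hllol cols → Pre_hllol_sum_cols hllol cols → Spec_hllol_sum_cols hllol cols (hllol_sum_cols hllol cols)

-- ===== LEMMAS AND PROOFS =====

-- One row-step of B: zipping the accumulator list (a map over sel) with sel and adding.
theorem pv_row_step (sel : List Int) (g : Int → Int) (row : List Int) :
    ((sel.map g).zip sel).map (fun p => p.1 + PySem.List.pyGetD row p.2 0)
      = sel.map (fun i => g i + PySem.List.pyGetD row i 0) := by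
  induction sel with
  | nil => rfl
  | cons i sel ih => simp [ih]

-- B's whole row loop computes, per selected index, A's per-column sum.
theorem pv_sums (lol : List (List Int)) (sel : List Int) (g : Int → Int) :
    lol.foldl (fun sums row => (sums.zip sel).map (fun p => p.1 + PySem.List.pyGetD row p.2 0)) (sel.map g)
      = sel.map (fun i => lol.foldl (fun s row => s + PySem.List.pyGetD row i 0) (g i)) := by
  induction lol generalizing g with
  | nil => rfl
  | cons row lol ih =>
      simp only [List.foldl_cons, pv_row_step]
      exact ih (fun i => g i + PySem.List.pyGetD row i 0)

-- Folding A's conditional insert over a list of (index, name) pairs whose names are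
-- recoverable from the index equals B's unconditional insert over the filtered indices.
theorem pv_build (header_ls cols_ls : List String) (colsum : Int → Int)
    (L : List (Int × String))
    (hL : ∀ ic ∈ L, PySem.List.pyGetD header_ls ic.1 "" = ic.2) (d : PySem.Dict String Int) :
    L.foldl (fun d ic => if ic.2 ∈ cols_ls then d.insert ic.2 (colsum ic.1) else d) d
      = (L.filterMap (fun ic => if ic.2 ∈ PySem.Set.ofList cols_ls then some ic.1 else none)).foldl
          (fun d i => d.insert (PySem.List.pyGetD header_ls i "") (colsum i)) d := by
  induction L generalizing d with
  | nil => rfl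
  | cons ic L ih =>
      have hhead : PySem.List.pyGetD header_ls ic.1 "" = ic.2 := hL ic (by simp)
      have htail : ∀ p ∈ L, PySem.List.pyGetD header_ls p.1 "" = p.2 :=
        fun p hp => hL p (by simp [hp])
      by_cases hmem : ic.2 ∈ cols_ls
      · simp only [List.foldl_cons, List.filterMap_cons, hmem, if_pos,
          (PySem.Set.mem_ofList cols_ls ic.2).mpr hmem, List.foldl_cons, hhead]
        exact ih htail _
      · have hn : ic.2 ∉ PySem.Set.ofList cols_ls := fun h => hmem ((PySem.Set.mem_ofList cols_ls ic.2).mp h)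
        simp only [List.foldl_cons, List.filterMap_cons, if_neg hmem, if_neg hn]
        exact ih htail d

theorem pv_enum_get (header_ls : List String) :
    ∀ ic ∈ PySem.List.enumerate header_ls, PySem.List.pyGetD header_ls ic.1 "" = ic.2 := by
  intro ic hic
  rcases (PySem.List.mem_enumerate_iff header_ls 0 ic).mp hic with ⟨k, hk, rfl⟩
  simp [PySem.List.pyGetD_natCast, List.getD_eq_getElem?_getD, hk]

-- zip of a list with a map over itself, pairwise.
theorem pv_zip_self_map (sel : List Int) (c : Int → Int) :
    sel.zip (sel.map c) = sel.map (fun i => (i, c i)) := by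
  induction sel with
  | nil => rfl
  | cons i sel ih => simp [ih]

-- ===== VERDICT (by name: the statement is the Claim_ definition above) =====
theorem hllol_sum_cols_spec : Claim_equal_hllol_sum_cols := by
  intro hllol cols _hdom _hpre
  show _ = hllol_sum_cols_alt hllol cols
  unfold hllol_sum_cols hllol_sum_cols_alt
  obtain ⟨header_ls, lol⟩ := hllol
  simp only
  rw [pv_sums lol _ (fun _ => 0)]
  rw [pv_zip_self_map, List.foldl_map]
  rw [pv_build header_ls (cols.getD header_ls)
        (fun i => lol.foldl (fun s row => s + PySem.List.pyGetD row i 0) 0)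
        (PySem.List.enumerate header_ls) (pv_enum_get header_ls) PySem.Dict.empty]
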